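-- pv_equiv track=rewrite | github.com/kiansweeney11/ca117-programming2 | ssd_122.py | ssd
-- ===== SOURCE A (Python) =====
-- def ssd(p, s):
--     number = int(s[0])
--     base = int(s[1])
--     a = []
--     i = 0
--     while i <= p:
--         z = (number // (base ** (p - i)))
--         a.append(int(z))
--         number = (number - ((base ** (p - i)) * z))
--         i = i + 1
--     return a
-- ===== SOURCE B (Python) =====
-- def ssd(p, s):
--     number = int(s[0])
--     base = int(s[1])
--     if p < 0:
--         return []
--     pw = [1]
--     for _ in range(p):
--         pw.append(pw[-1] * base)
--     return [number // pw[p]] + [number % pw[j + 1] // pw[j] for j in range(p - 1, -1, -1)]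
-- ===== Notes on version B (the rewrite author's own statement) =====
-- stated objective: faster
-- what changed: Replaces the running-remainder loop that recomputes base**(p-i) from scratch on every iteration by a power table built once with p incremental multiplications plus a closed-form digit expression (number % pw[j+1] // pw[j]) for each position.
import Mathlib
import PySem

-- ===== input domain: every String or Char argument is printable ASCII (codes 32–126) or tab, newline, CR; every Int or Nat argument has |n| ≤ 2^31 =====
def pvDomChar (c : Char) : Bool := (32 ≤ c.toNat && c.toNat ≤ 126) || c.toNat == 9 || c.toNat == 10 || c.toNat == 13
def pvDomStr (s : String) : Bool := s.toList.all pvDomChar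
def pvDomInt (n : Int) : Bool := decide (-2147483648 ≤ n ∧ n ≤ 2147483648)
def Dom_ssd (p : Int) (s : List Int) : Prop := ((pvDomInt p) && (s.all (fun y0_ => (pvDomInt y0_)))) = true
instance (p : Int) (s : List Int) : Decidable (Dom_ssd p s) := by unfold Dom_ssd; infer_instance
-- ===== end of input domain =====

-- B builds the p+1 powers of base once (p incremental multiplications) and reads each digit
-- off with a closed-form expression, instead of recomputing base**(p-i) in every loop iteration.


-- ===== PORT A =====
-- the 'while i <= p' loop of A; recursion on the remaining iteration count
def ssdGo (p base : Int) (number i : Int) : List Int :=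
  if h : i ≤ p then
    let z := PySem.Int.floordiv number (base ^ (p - i).toNat)
    z :: ssdGo p base (number - base ^ (p - i).toNat * z) (i + 1)
  else []
termination_by (p + 1 - i).toNat
decreasing_by omega

def ssd (p : Int) (s : List Int) : List Int :=
  let number := (PySem.List.pyGet? s 0).getD 0
  let base := (PySem.List.pyGet? s 1).getD 0
  ssdGo p base number 0

-- ===== PORT B =====
def ssd_alt (p : Int) (s : List Int) : List Int :=
  let number := (PySem.List.pyGet? s 0).getD 0
  let base := (PySem.List.pyGet? s 1).getD 0
  if p < 0 then []
  else
    let pw := (List.range p.toNat).foldl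
      (fun acc _ => acc ++ [((PySem.List.pyGet? acc (-1)).getD 0) * base]) [1]
    PySem.Int.floordiv number ((PySem.List.pyGet? pw p).getD 0) ::
      (PySem.List.pyRange (p - 1) (-1) (-1)).map (fun j =>
        PySem.Int.floordiv
          (PySem.Int.mod number ((PySem.List.pyGet? pw (j + 1)).getD 0))
          ((PySem.List.pyGet? pw j).getD 0))

-- ===== PRECONDITION & SPEC =====
-- Pre_ excludes exactly the inputs where Python A raises: lists with fewer than two
-- elements (IndexError on s[0]/s[1]) and base = 0 with p >= 1 (ZeroDivisionError).
def Pre_ssd (p : Int) (s : List Int) : Prop :=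
  2 ≤ s.length ∧ (p < 1 ∨ PySem.List.pyGet? s 1 ≠ some 0)
instance (p : Int) (s : List Int) : Decidable (Pre_ssd p s) := by unfold Pre_ssd; infer_instance

def pvWitness_ssd : Int × List Int := (3, [11, 2])

def Spec_ssd (p : Int) (s : List Int) (out : List Int) : Prop := out = ssd_alt p s
instance (p : Int) (s : List Int) (out : List Int) : Decidable (Spec_ssd p s out) := by
  unfold Spec_ssd; infer_instance

-- ===== CLAIM =====
def Claim_equal_ssd : Prop := ∀ (p : Int) (s : List Int), Dom_ssd p s → Pre_ssd p s → Spec_ssd p s (ssd p s)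

-- ===== LEMMAS AND PROOFS =====

-- A's loop, rephrased as structural recursion on the number of remaining digits
def msbDigits (b : Int) : Nat → Int → List Int
  | 0, n => [PySem.Int.floordiv n (b ^ 0)]
  | k + 1, n =>
    PySem.Int.floordiv n (b ^ (k + 1)) ::
      msbDigits b k (n - b ^ (k + 1) * PySem.Int.floordiv n (b ^ (k + 1)))

theorem ssdGo_eq_msb (p base : Int) : ∀ (k : Nat) (n i : Int), i ≤ p → (p - i).toNat = k →
    ssdGo p base n i = msbDigits base k n := by
  intro k
  induction k with
  | zero =>
    intro n i hip hk
    rw [ssdGo.eq_def, dif_pos hip]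
    simp only [hk]
    rw [ssdGo.eq_def, dif_neg (by omega : ¬ i + 1 ≤ p)]
    rfl
  | succ k ih =>
    intro n i hip hk
    rw [ssdGo.eq_def, dif_pos hip]
    simp only [hk]
    rw [msbDigits]
    exact congrArg _ (ih _ (i + 1) (by omega) (by omega))

-- the running remainder of A's loop equals n mod b^(k+1) (Python floor-mod)
theorem msb_closed (b : Int) : ∀ (k : Nat) (n : Int),
    msbDigits b k n = PySem.Int.floordiv n (b ^ k) ::
      (List.range k).reverse.map
        (fun j : Nat => PySem.Int.floordiv (PySem.Int.mod n (b ^ (j + 1))) (b ^ j)) := by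
  intro k
  induction k with
  | zero => intro n; rfl
  | succ k ih =>
    intro n
    have hmod : n - b ^ (k + 1) * PySem.Int.floordiv n (b ^ (k + 1)) =
        PySem.Int.mod n (b ^ (k + 1)) := by
      simp [PySem.Int.mod, PySem.Int.floordiv, Int.fmod_def]
    have hrev : (List.range (k + 1)).reverse = k :: (List.range k).reverse := by
      rw [List.range_succ, List.reverse_append]; rfl
    rw [msbDigits, hmod, ih, hrev, List.map_cons]
    congr 2
    apply List.map_congr_left
    intro j hj
    have hjk : j < k := List.mem_range.mp (List.mem_reverse.mp hj)
    simp only [PySem.Int.mod, PySem.Int.floordiv]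
    rw [Int.fmod_fmod_of_dvd n (pow_dvd_pow b (by omega))]

-- B's power table is the list [base^0, …, base^k]
theorem pw_char (base : Int) : ∀ k : Nat,
    (List.range k).foldl
      (fun acc _ => acc ++ [((PySem.List.pyGet? acc (-1)).getD 0) * base]) [1]
    = (List.range (k + 1)).map (fun j : Nat => base ^ j) := by
  intro k
  induction k with
  | zero => simp
  | succ k ih =>
    rw [List.range_succ, List.foldl_append, ih]
    have hlast : PySem.List.pyGet? ((List.range (k + 1)).map (fun j : Nat => base ^ j)) (-1)
        = some (base ^ k) := by
      rw [PySem.List.pyGet?_neg_one, List.range_succ, List.map_append]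
      exact List.getLast?_concat
    simp only [List.foldl_cons, List.foldl_nil, hlast, Option.getD_some]
    rw [List.range_succ (n := k + 1), List.map_append]
    simp [pow_succ]

theorem pw_get (base : Int) (k j : Nat) (hj : j < k + 1) :
    (PySem.List.pyGet? ((List.range (k + 1)).map (fun i : Nat => base ^ i)) ((j : Nat) : Int)).getD 0
      = base ^ j := by
  rw [PySem.List.pyGet?_natCast]
  simp [hj]

theorem pyRange_down (p : Int) (hp : 0 ≤ p) :
    PySem.List.pyRange (p - 1) (-1) (-1)
      = (List.range p.toNat).map (fun m : Nat => p - 1 - (m : Int)) := by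
  simp only [PySem.List.pyRange]
  rw [if_neg (by norm_num : ¬ (-1 : Int) = 0), if_neg (by norm_num : ¬ (0 : Int) < -1)]
  by_cases hpp : (-1 : Int) < p - 1
  · rw [if_pos hpp]
    have hc : ((p - 1 - -1 + - -1 - 1) / - -1).toNat = p.toNat := by
      norm_num
    rw [hc]
    apply List.map_congr_left
    intro m _
    ring
  · rw [if_neg hpp]
    have hp0 : p.toNat = 0 := by omega
    rw [hp0]
    rfl

theorem down_eq_rev (k : Nat) :
    (List.range k).map (fun m : Nat => (k : Int) - 1 - (m : Int))
      = (List.range k).reverse.map (fun j : Nat => (j : Int)) := by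
  induction k with
  | zero => rfl
  | succ k ih =>
    have hrev : (List.range (k + 1)).reverse = k :: (List.range k).reverse := by
      rw [List.range_succ, List.reverse_append]; rfl
    rw [hrev, List.map_cons, List.range_succ_eq_map, List.map_cons, List.map_map]
    congr 1
    · push_cast; ring
    · rw [← ih]
      apply List.map_congr_left
      intro m _
      simp only [Function.comp]
      push_cast
      ring

-- ===== VERDICT =====
theorem ssd_spec : Claim_equal_ssd := by
  intro p s _ _
  unfold Spec_ssd
  by_cases hp : p < 0
  · simp only [ssd, ssd_alt, if_pos hp]
    rw [ssdGo.eq_def, dif_neg (by omega : ¬ (0 : Int) ≤ p)]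
  · simp only [ssd, ssd_alt, if_neg hp]
    rw [ssdGo_eq_msb p _ p.toNat _ 0 (by omega) (by omega), msb_closed]
    rw [pw_char, pyRange_down p (by omega)]
    have hcast : ((p.toNat : Nat) : Int) = p := by omega
    congr 1
    · have hg := pw_get ((PySem.List.pyGet? s 1).getD 0) p.toNat p.toNat (by omega)
      rw [hcast] at hg
      rw [hg]
    · have hd := down_eq_rev p.toNat
      rw [hcast] at hd
      rw [hd, List.map_map]
      apply List.map_congr_left
      intro j hj
      have hjk : j < p.toNat := List.mem_range.mp (List.mem_reverse.mp hj)
      simp only [Function.comp]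
      rw [show ((j : Int) + 1) = (((j + 1 : Nat)) : Int) from by push_cast; ring]
      rw [pw_get _ p.toNat (j + 1) (by omega), pw_get _ p.toNat j (by omega)]
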